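-- pv_equiv track=rewrite | github.com/ThomasDebrunner/auto_code_cpa | scamp_filter/ScampProgrammer.py | generate_scamp_shift
-- ===== SOURCE A (Python) =====
-- def generate_scamp_shift(source, target, scale, shift, neg, reg_names):
--     program = []
--     s, t = reg_names[source], reg_names[target]
--     if scale == 0 and shift == (0, 0) and not neg:
--         program.append('%s = copy(%s)' % (t, s))
--         return program
--
--     copied = False
--
--     for _ in range(shift[1], 0):
--         program.append('%s = south(%s)' % (t, s if not copied else t))
--         copied = True
--     for _ in range(0, shift[1]):
--         program.append('%s = north(%s)' % (t, s if not copied else t))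
--         copied = True
--
--     for _ in range(shift[0], 0):
--         program.append('%s = west(%s)' % (t, s if not copied else t))
--         copied = True
--     for _ in range(0, shift[0]):
--         program.append('%s = east(%s)' % (t, s if not copied else t))
--         copied = True
--     for _ in range(scale, 0):
--         program.append('%s = add(%s, %s)' % (t, s if not copied else t, s if not copied else t))
--         copied = True
--     for _ in range(0, scale):
--         program.append('%s = div2(%s)' % (t, s if not copied else t))
--         copied = True
--     if neg:
--         ss = s if not copied else t
--         if ss == t:
--             program.append('%s = sneg(%s)' % (t, ss))
--         else:
--             program.append('%s = neg(%s)' % (t, ss))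
--
--     return program
-- ===== SOURCE B (Python) =====
-- def generate_scamp_shift(source, target, scale, shift, neg, reg_names):
--     s, t = reg_names[source], reg_names[target]
--     if scale == 0 and shift == (0, 0) and not neg:
--         return ['%s = copy(%s)' % (t, s)]
--     ops = (['south'] * -shift[1] + ['north'] * shift[1]
--            + ['west'] * -shift[0] + ['east'] * shift[0]
--            + ['add'] * -scale + ['div2'] * scale
--            + (['neg'] if neg else []))
--     out = []
--     for i, op in enumerate(ops):
--         r = s if i == 0 else t
--         if op == 'add':
--             out.append('%s = add(%s, %s)' % (t, r, r))
--         elif op == 'neg':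
--             out.append('%s = %s(%s)' % (t, 'sneg' if r == t else 'neg', r))
--         else:
--             out.append('%s = %s(%s)' % (t, op, r))
--     return out
-- ===== Notes on version B (the rewrite author's own statement) =====
-- stated objective: alternative
-- what changed: A interleaves register choice with emission via a 'copied' flag threaded through six counting loops; B first builds an abstract op list (south/north/west/east/add/div2/neg) from the counts, then renders it in a single second pass where only index 0 reads the source register.
import Mathlib
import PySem

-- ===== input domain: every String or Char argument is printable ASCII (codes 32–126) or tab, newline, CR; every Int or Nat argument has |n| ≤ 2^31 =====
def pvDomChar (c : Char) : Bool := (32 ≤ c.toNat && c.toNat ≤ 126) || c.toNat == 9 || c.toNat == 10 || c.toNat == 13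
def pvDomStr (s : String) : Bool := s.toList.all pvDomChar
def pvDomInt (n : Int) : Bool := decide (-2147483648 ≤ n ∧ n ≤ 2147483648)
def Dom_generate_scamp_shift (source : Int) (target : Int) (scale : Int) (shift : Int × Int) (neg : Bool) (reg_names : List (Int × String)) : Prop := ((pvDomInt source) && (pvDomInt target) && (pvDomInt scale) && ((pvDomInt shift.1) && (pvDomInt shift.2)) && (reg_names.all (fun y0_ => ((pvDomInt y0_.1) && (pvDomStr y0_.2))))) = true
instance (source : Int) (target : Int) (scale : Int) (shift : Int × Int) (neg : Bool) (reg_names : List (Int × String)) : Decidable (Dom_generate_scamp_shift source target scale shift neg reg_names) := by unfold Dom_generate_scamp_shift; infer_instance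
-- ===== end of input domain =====

-- ===== PORT A =====
-- B builds an abstract op list first and renders it in a second pass; A threads a 'copied' flag
-- through six emitting loops. Equivalence of the return values is proved on Pre_ (both register keys present).
def generate_scamp_shift (source : Int) (target : Int) (scale : Int) (shift : Int × Int) (neg : Bool) (reg_names : List (Int × String)) : List String :=
  let d := PySem.Dict.ofList reg_names
  let s := (d.get? source).getD ""   -- reg_names[source]; KeyError excluded by Pre_
  let t := (d.get? target).getD ""
  if scale = 0 ∧ shift = (0, 0) ∧ neg = false then
    [t ++ " = copy(" ++ s ++ ")"]
  else
    let st : List String × Bool := ([], false)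
    let st := (PySem.List.pyRange shift.2 0 1).foldl
      (fun (st : List String × Bool) _ => (st.1 ++ [t ++ " = south(" ++ (if st.2 then t else s) ++ ")"], true)) st
    let st := (PySem.List.pyRange 0 shift.2 1).foldl
      (fun (st : List String × Bool) _ => (st.1 ++ [t ++ " = north(" ++ (if st.2 then t else s) ++ ")"], true)) st
    let st := (PySem.List.pyRange shift.1 0 1).foldl
      (fun (st : List String × Bool) _ => (st.1 ++ [t ++ " = west(" ++ (if st.2 then t else s) ++ ")"], true)) st
    let st := (PySem.List.pyRange 0 shift.1 1).foldl
      (fun (st : List String × Bool) _ => (st.1 ++ [t ++ " = east(" ++ (if st.2 then t else s) ++ ")"], true)) st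
    let st := (PySem.List.pyRange scale 0 1).foldl
      (fun (st : List String × Bool) _ => (st.1 ++ [t ++ " = add(" ++ (if st.2 then t else s) ++ ", " ++ (if st.2 then t else s) ++ ")"], true)) st
    let st := (PySem.List.pyRange 0 scale 1).foldl
      (fun (st : List String × Bool) _ => (st.1 ++ [t ++ " = div2(" ++ (if st.2 then t else s) ++ ")"], true)) st
    let st := if neg then
        let ss := if st.2 then t else s
        if ss = t then (st.1 ++ [t ++ " = sneg(" ++ ss ++ ")"], st.2)
        else (st.1 ++ [t ++ " = neg(" ++ ss ++ ")"], st.2)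
      else st
    st.1

-- ===== PORT B =====
-- renderer for one abstract op: operand is s at index 0, t afterwards
def pvRenderOp (t s : String) (i : Int) (op : String) : String :=
  let r := if i = 0 then s else t
  if op = "add" then t ++ " = add(" ++ r ++ ", " ++ r ++ ")"
  else if op = "neg" then t ++ " = " ++ (if r = t then "sneg" else "neg") ++ "(" ++ r ++ ")"
  else t ++ " = " ++ op ++ "(" ++ r ++ ")"

def generate_scamp_shift_alt (source : Int) (target : Int) (scale : Int) (shift : Int × Int) (neg : Bool) (reg_names : List (Int × String)) : List String :=
  let d := PySem.Dict.ofList reg_names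
  let s := (d.get? source).getD ""
  let t := (d.get? target).getD ""
  if scale = 0 ∧ shift = (0, 0) ∧ neg = false then
    [t ++ " = copy(" ++ s ++ ")"]
  else
    let ops := List.replicate (-shift.2).toNat "south" ++ List.replicate shift.2.toNat "north"
      ++ List.replicate (-shift.1).toNat "west" ++ List.replicate shift.1.toNat "east"
      ++ List.replicate (-scale).toNat "add" ++ List.replicate scale.toNat "div2"
      ++ (if neg then ["neg"] else [])
    (PySem.List.enumerate ops).map (fun p => pvRenderOp t s p.1 p.2)

-- ===== PRECONDITION & SPEC =====
-- Pre_ excludes exactly the inputs where Python A raises KeyError: source or target not a key of reg_names.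
def Pre_generate_scamp_shift (source : Int) (target : Int) (scale : Int) (shift : Int × Int) (neg : Bool) (reg_names : List (Int × String)) : Prop :=
  (PySem.Dict.ofList reg_names).contains source = true ∧ (PySem.Dict.ofList reg_names).contains target = true
instance (source : Int) (target : Int) (scale : Int) (shift : Int × Int) (neg : Bool) (reg_names : List (Int × String)) : Decidable (Pre_generate_scamp_shift source target scale shift neg reg_names) := by unfold Pre_generate_scamp_shift; infer_instance
def pvWitness_generate_scamp_shift : Int × Int × Int × (Int × Int) × Bool × (List (Int × String)) :=
  (0, 1, 1, (-1, 2), true, [(0, "A"), (1, "B")])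

def Spec_generate_scamp_shift (source : Int) (target : Int) (scale : Int) (shift : Int × Int) (neg : Bool) (reg_names : List (Int × String)) (out : List String) : Prop := out = generate_scamp_shift_alt source target scale shift neg reg_names
instance (source : Int) (target : Int) (scale : Int) (shift : Int × Int) (neg : Bool) (reg_names : List (Int × String)) (out : List String) : Decidable (Spec_generate_scamp_shift source target scale shift neg reg_names out) := by unfold Spec_generate_scamp_shift; infer_instance

-- ===== CLAIM (what is proved, stated in full; the proofs are below) =====
def Claim_equal_generate_scamp_shift : Prop := ∀ (source : Int) (target : Int) (scale : Int) (shift : Int × Int) (neg : Bool) (reg_names : List (Int × String)), Dom_generate_scamp_shift source target scale shift neg reg_names → Pre_generate_scamp_shift source target scale shift neg reg_names → Spec_generate_scamp_shift source target scale shift neg reg_names (generate_scamp_shift source target scale shift neg reg_names)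

-- ===== LEMMAS AND PROOFS =====
-- render with the index abstracted to "is this the first instruction"
def pvRenderW (t s : String) (c : Bool) (op : String) : String := pvRenderOp t s (if c then 1 else 0) op

-- what one of A's emitting loops produces, as a function of the entry flag and the iteration count
def pvEmits (g : Bool → String) : Bool → Nat → List String
  | _, 0 => []
  | c, n + 1 => g c :: pvEmits g true n

-- rendering an op list with the first-instruction flag threaded through
def pvRenderSeq (t s : String) : List String → Bool → List String
  | [], _ => []
  | op :: rest, c => pvRenderW t s c op :: pvRenderSeq t s rest true

theorem pvFoldl_emit {α : Type} (g : Bool → String) (l : List α) (prog : List String) (c : Bool) :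
    l.foldl (fun (st : List String × Bool) _ => (st.1 ++ [g st.2], true)) (prog, c)
      = (prog ++ pvEmits g c l.length, c || !decide (l.length = 0)) := by
  induction l generalizing prog c with
  | nil => simp [pvEmits]
  | cons x xs ih => simp [List.foldl_cons, ih, pvEmits]

theorem pvEmits_renderSeq (t s op : String) (g : Bool → String) (h : ∀ c, g c = pvRenderW t s c op) (n : Nat) :
    ∀ c, pvEmits g c n = pvRenderSeq t s (List.replicate n op) c := by
  induction n with
  | zero => intro c; simp [pvEmits, pvRenderSeq]
  | succ m ih => intro c; simp [pvEmits, pvRenderSeq, List.replicate_succ, h, ih]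

theorem pvRenderSeq_append (t s : String) (l1 l2 : List String) (c : Bool) :
    pvRenderSeq t s (l1 ++ l2) c = pvRenderSeq t s l1 c ++ pvRenderSeq t s l2 (c || !decide (l1.length = 0)) := by
  induction l1 generalizing c with
  | nil => simp [pvRenderSeq]
  | cons x xs ih => simp [pvRenderSeq, ih]

theorem pvEnumMap_pos (t s : String) (ops : List String) (k : Int) (hk : 1 ≤ k) :
    (PySem.List.enumerate ops k).map (fun p => pvRenderOp t s p.1 p.2) = pvRenderSeq t s ops true := by
  induction ops generalizing k with
  | nil => simp [PySem.List.enumerate_nil, pvRenderSeq]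
  | cons x xs ih =>
    rw [PySem.List.enumerate_cons, List.map_cons, ih (k + 1) (by omega)]
    simp only [pvRenderSeq]
    congr 1
    simp [pvRenderOp, pvRenderW, show ¬(k = 0) by omega]

theorem pvEnumMap_zero (t s : String) (ops : List String) :
    (PySem.List.enumerate ops).map (fun p => pvRenderOp t s p.1 p.2) = pvRenderSeq t s ops false := by
  cases ops with
  | nil => simp [PySem.List.enumerate_nil, pvRenderSeq]
  | cons x xs =>
    rw [PySem.List.enumerate_cons, List.map_cons, pvEnumMap_pos t s xs (0+1) (by norm_num)]
    simp only [pvRenderSeq]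
    simp [pvRenderOp, pvRenderW]

theorem pvW_south (S T : String) : ∀ c, (T ++ " = south(" ++ (if c then T else S) ++ ")") = pvRenderW T S c "south" := by
  intro c; cases c <;> simp [pvRenderW, pvRenderOp, String.append_assoc]

theorem pvW_north (S T : String) : ∀ c, (T ++ " = north(" ++ (if c then T else S) ++ ")") = pvRenderW T S c "north" := by
  intro c; cases c <;> simp [pvRenderW, pvRenderOp, String.append_assoc]

theorem pvW_west (S T : String) : ∀ c, (T ++ " = west(" ++ (if c then T else S) ++ ")") = pvRenderW T S c "west" := by
  intro c; cases c <;> simp [pvRenderW, pvRenderOp, String.append_assoc]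

theorem pvW_east (S T : String) : ∀ c, (T ++ " = east(" ++ (if c then T else S) ++ ")") = pvRenderW T S c "east" := by
  intro c; cases c <;> simp [pvRenderW, pvRenderOp, String.append_assoc]

theorem pvW_add (S T : String) : ∀ c, (T ++ " = add(" ++ (if c then T else S) ++ ", " ++ (if c then T else S) ++ ")") = pvRenderW T S c "add" := by
  intro c; cases c <;> simp [pvRenderW, pvRenderOp, String.append_assoc]

theorem pvW_div2 (S T : String) : ∀ c, (T ++ " = div2(" ++ (if c then T else S) ++ ")") = pvRenderW T S c "div2" := by
  intro c; cases c <;> simp [pvRenderW, pvRenderOp, String.append_assoc]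

theorem pvNeg_pair (S T : String) (P : List String) (c : Bool) :
    (if (if c then T else S) = T then (P ++ [T ++ " = sneg(" ++ (if c then T else S) ++ ")"], c)
     else (P ++ [T ++ " = neg(" ++ (if c then T else S) ++ ")"], c)).1
    = P ++ [pvRenderW T S c "neg"] := by
  cases c <;> split_ifs <;> simp_all [pvRenderW, pvRenderOp, String.append_assoc]

-- A's whole else-branch, for abstract register names, equals B's rendering of the abstract op list
theorem pvChain (S T : String) (sh1 sh2 scl : Int) (negb : Bool) :
    (let st : List String × Bool := ([], false)
     let st := (PySem.List.pyRange sh2 0 1).foldl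
       (fun (st : List String × Bool) _ => (st.1 ++ [T ++ " = south(" ++ (if st.2 then T else S) ++ ")"], true)) st
     let st := (PySem.List.pyRange 0 sh2 1).foldl
       (fun (st : List String × Bool) _ => (st.1 ++ [T ++ " = north(" ++ (if st.2 then T else S) ++ ")"], true)) st
     let st := (PySem.List.pyRange sh1 0 1).foldl
       (fun (st : List String × Bool) _ => (st.1 ++ [T ++ " = west(" ++ (if st.2 then T else S) ++ ")"], true)) st
     let st := (PySem.List.pyRange 0 sh1 1).foldl
       (fun (st : List String × Bool) _ => (st.1 ++ [T ++ " = east(" ++ (if st.2 then T else S) ++ ")"], true)) st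
     let st := (PySem.List.pyRange scl 0 1).foldl
       (fun (st : List String × Bool) _ => (st.1 ++ [T ++ " = add(" ++ (if st.2 then T else S) ++ ", " ++ (if st.2 then T else S) ++ ")"], true)) st
     let st := (PySem.List.pyRange 0 scl 1).foldl
       (fun (st : List String × Bool) _ => (st.1 ++ [T ++ " = div2(" ++ (if st.2 then T else S) ++ ")"], true)) st
     let st := if negb then
         let ss := if st.2 then T else S
         if ss = T then (st.1 ++ [T ++ " = sneg(" ++ ss ++ ")"], st.2)
         else (st.1 ++ [T ++ " = neg(" ++ ss ++ ")"], st.2)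
       else st
     st.1)
    = pvRenderSeq T S (List.replicate (-sh2).toNat "south" ++ List.replicate sh2.toNat "north"
        ++ List.replicate (-sh1).toNat "west" ++ List.replicate sh1.toNat "east"
        ++ List.replicate (-scl).toNat "add" ++ List.replicate scl.toNat "div2"
        ++ (if negb then ["neg"] else [])) false := by
  dsimp only
  rw [pvFoldl_emit (fun c => T ++ " = south(" ++ (if c then T else S) ++ ")"),
      pvFoldl_emit (fun c => T ++ " = north(" ++ (if c then T else S) ++ ")"),
      pvFoldl_emit (fun c => T ++ " = west(" ++ (if c then T else S) ++ ")"),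
      pvFoldl_emit (fun c => T ++ " = east(" ++ (if c then T else S) ++ ")"),
      pvFoldl_emit (fun c => T ++ " = add(" ++ (if c then T else S) ++ ", " ++ (if c then T else S) ++ ")"),
      pvFoldl_emit (fun c => T ++ " = div2(" ++ (if c then T else S) ++ ")"),
      pvEmits_renderSeq T S "south" _ (pvW_south S T),
      pvEmits_renderSeq T S "north" _ (pvW_north S T),
      pvEmits_renderSeq T S "west" _ (pvW_west S T),
      pvEmits_renderSeq T S "east" _ (pvW_east S T),
      pvEmits_renderSeq T S "add" _ (pvW_add S T),
      pvEmits_renderSeq T S "div2" _ (pvW_div2 S T)]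
  cases negb with
  | false =>
    simp [pvRenderSeq_append, PySem.List.length_pyRange_one, zero_sub, sub_zero]
  | true =>
    simp only [if_true]
    rw [pvNeg_pair]
    simp [pvRenderSeq_append, PySem.List.length_pyRange_one, zero_sub, sub_zero, pvRenderSeq]

-- ===== VERDICT (by name: the statement is the Claim_ definition above) =====
theorem generate_scamp_shift_spec : Claim_equal_generate_scamp_shift := by
  intro source target scale shift neg reg_names _ _
  unfold Spec_generate_scamp_shift generate_scamp_shift generate_scamp_shift_alt
  by_cases h : scale = 0 ∧ shift = ((0 : Int), (0 : Int)) ∧ neg = false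
  · simp only [if_pos h]
  · simp only [if_neg h]
    rw [pvEnumMap_zero]
    exact pvChain _ _ shift.1 shift.2 scale neg
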